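-- pv_equiv track=rewrite | github.com/vincenzorm117/CCI_6edition | problems/chapter5/3_flip_bit_to_win/python/solution.py | flip_bit_to_win0
-- ===== SOURCE A (Python) =====
-- def flip_bit_to_win0(x):
-- 	if x == 2^33 - 1:
-- 		return 32
-- 	elif x == 0:
-- 		return 1
-- 	def find_longest_length(x):
-- 		longest = 0
-- 		i = 0
-- 		while i < 32:
-- 			if (1 << i) & x != 0:
-- 				count = 0
-- 				j = i
-- 				while (1 << j) & x != 0:
-- 					count += 1
-- 					j += 1
-- 				if longest < count:
-- 					longest = count
-- 				i = j
-- 			i += 1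
-- 		return longest
-- 	ac = 0
-- 	for i in range(32):
-- 		if (1 << i) & x == 0:
-- 			l = find_longest_length((1 << i) | x)
-- 			if ac < l:
-- 				ac = l
-- 	return ac
-- ===== SOURCE B (Python) =====
-- def _above(x, k):
--     # number of consecutive set bits of x at positions k, k+1, ... (scanning up to bit 32)
--     if k >= 33:
--         return 0
--     return _above(x, k + 1) + 1 if (x >> k) & 1 else 0
--
--
-- def flip_bit_to_win0(x):
--     best, left = 0, 0
--     for i in range(32):
--         if (x >> i) & 1:
--             left += 1
--         else:
--             best = max(best, left + 1 + _above(x, i + 1))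
--             left = 0
--     return best
-- ===== Notes on version B (the rewrite author's own statement) =====
-- stated objective: simpler
-- what changed: A flips each zero bit and rescans the whole 32-bit word with nested run-counting loops per flip; B makes a single left-to-right pass keeping the length of the run of ones ending just below the current position and, at each zero bit, adds 1 plus the run of ones starting just above it, taking the running maximum.
-- intended difference: On x = 34 only: A's guard 'x == 2^33 - 1' is XOR, not exponentiation (2^33-1 evaluates to 34), so A returns 32 there, while B returns 2, the true longest 1-run of 0b100010 after one flip; the guard was meant to catch the all-ones word, so B's value is the intended one. — e.g. on flip_bit_to_win0(34): A returns 32, B returns 2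
import Mathlib
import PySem

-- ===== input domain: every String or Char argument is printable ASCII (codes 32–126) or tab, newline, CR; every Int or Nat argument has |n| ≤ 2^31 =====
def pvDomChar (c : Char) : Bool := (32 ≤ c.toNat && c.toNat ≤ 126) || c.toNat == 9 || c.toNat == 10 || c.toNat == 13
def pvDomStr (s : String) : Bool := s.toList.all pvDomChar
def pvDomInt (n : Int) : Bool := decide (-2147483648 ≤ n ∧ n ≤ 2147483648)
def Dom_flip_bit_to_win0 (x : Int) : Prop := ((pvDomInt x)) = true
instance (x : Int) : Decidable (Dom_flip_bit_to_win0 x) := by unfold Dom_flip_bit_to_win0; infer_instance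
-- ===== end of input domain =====

-- B replaces A's flip-each-zero-bit-and-rescan nested loops by one left-to-right pass over the
-- 32 bit positions keeping run lengths (objective: simpler).

-- ===== PORT A =====
-- inner 'while (1 << j) & x != 0: count += 1; j += 1' of find_longest_length, fuel-bounded
-- (on inputs where the Python loop terminates a run is at most 33 long, so fuel 40 is never hit)
def pvInner (x : Int) : Nat → Int → Int → Int × Int
  | 0, count, j => (count, j)
  | fuel+1, count, j =>
    if PySem.Int.band ((1 : Int) <<< j.toNat) x ≠ 0 then pvInner x fuel (count + 1) (j + 1)
    else (count, j)

-- outer 'while i < 32' of find_longest_length, fuel-bounded (i strictly increases each pass,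
-- so at most 33 passes happen; fuel 40 is never hit)
def pvFLL (x : Int) : Nat → Int → Int → Int
  | 0, _, longest => longest
  | fuel+1, i, longest =>
    if i < 32 then
      if PySem.Int.band ((1 : Int) <<< i.toNat) x ≠ 0 then
        let cj := pvInner x 40 0 i
        pvFLL x fuel (cj.2 + 1) (if longest < cj.1 then cj.1 else longest)
      else pvFLL x fuel (i + 1) longest
    else longest

def flip_bit_to_win0 (x : Int) : Int :=
  if x = PySem.Int.bxor 2 (33 - 1) then 32
  else if x = 0 then 1
  else
    (PySem.List.pyRange 0 32 1).foldl (fun ac i =>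
      if PySem.Int.band ((1 : Int) <<< i.toNat) x = 0 then
        let l := pvFLL (PySem.Int.bor ((1 : Int) <<< i.toNat) x) 40 0 0
        if ac < l then l else ac
      else ac) 0

-- ===== PORT B =====
-- Source B's _above: number of consecutive set bits of x at positions k, k+1, ... (stops at bit 32);
-- the extra fuel argument (40 > 33 recursive calls possible) only makes the recursion structural
def pvAbove (x : Int) : Nat → Nat → Int
  | 0, _ => 0
  | fuel+1, k =>
    if 33 ≤ k then 0
    else if PySem.Int.band (x >>> k) 1 ≠ 0 then pvAbove x fuel (k + 1) + 1 else 0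

def flip_bit_to_win0_alt (x : Int) : Int :=
  ((PySem.List.pyRange 0 32 1).foldl (fun (bl : Int × Int) i =>
    if PySem.Int.band (x >>> i.toNat) 1 ≠ 0 then (bl.1, bl.2 + 1)
    else (max bl.1 (bl.2 + 1 + pvAbove x 40 (i.toNat + 1)), 0)) (0, 0)).1

-- ===== PRECONDITION & SPEC =====
-- A's inner while loop never terminates on a negative x other than -1 (Python integers have
-- infinitely many high one bits, and flipping some zero bit below 32 always produces an
-- unbounded run), so A returns exactly on x ≥ 0 and on x = -1; Pre_ admits exactly those.
def Pre_flip_bit_to_win0 (x : Int) : Prop := 0 ≤ x ∨ x = -1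
instance (x : Int) : Decidable (Pre_flip_bit_to_win0 x) := by unfold Pre_flip_bit_to_win0; infer_instance
def pvWitness_flip_bit_to_win0 : Int := 5

-- On x = 34 only: A's guard 'x == 2^33 - 1' is XOR, not exponentiation (2^33-1 evaluates to 34),
-- so A returns 32 there, while B returns 2, the true longest 1-run of 0b100010 after one flip;
-- the guard was meant to catch the all-ones word, so B's value is the intended one.
def D_flip_bit_to_win0 (x : Int) : Prop := x = 34
instance (x : Int) : Decidable (D_flip_bit_to_win0 x) := by unfold D_flip_bit_to_win0; infer_instance

def Spec_flip_bit_to_win0 (x : Int) (out : Int) : Prop := ¬ D_flip_bit_to_win0 x → out = flip_bit_to_win0_alt x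
instance (x : Int) (out : Int) : Decidable (Spec_flip_bit_to_win0 x out) := by unfold Spec_flip_bit_to_win0; infer_instance

def pvDiffWitness_flip_bit_to_win0 : Int := 34
def pvDiffWitnessOut_flip_bit_to_win0 : Int × Int := (32, 2)

-- ===== CLAIM (what is proved, stated in full; the proofs are below) =====
def Claim_unchanged_flip_bit_to_win0 : Prop := ∀ (x : Int), Dom_flip_bit_to_win0 x → Pre_flip_bit_to_win0 x → Spec_flip_bit_to_win0 x (flip_bit_to_win0 x)
def Claim_changed_flip_bit_to_win0 : Prop := Dom_flip_bit_to_win0 (pvDiffWitness_flip_bit_to_win0) ∧ Pre_flip_bit_to_win0 (pvDiffWitness_flip_bit_to_win0) ∧ D_flip_bit_to_win0 (pvDiffWitness_flip_bit_to_win0) ∧ flip_bit_to_win0 (pvDiffWitness_flip_bit_to_win0) = pvDiffWitnessOut_flip_bit_to_win0.1 ∧ flip_bit_to_win0_alt (pvDiffWitness_flip_bit_to_win0) = pvDiffWitnessOut_flip_bit_to_win0.2 ∧ pvDiffWitnessOut_flip_bit_to_win0.1 ≠ pvDiffWitnessOut_flip_bit_to_win0.2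
def Claim_exact_flip_bit_to_win0 : Prop := ∀ (x : Int), Dom_flip_bit_to_win0 x → Pre_flip_bit_to_win0 x → D_flip_bit_to_win0 x → flip_bit_to_win0 x ≠ flip_bit_to_win0_alt x

-- ===== LEMMAS AND PROOFS =====

set_option maxHeartbeats 1000000
set_option maxRecDepth 100000

-- (a < b ? b : a) is max
theorem pv_if_max (a b : Int) : (if a < b then b else a) = max a b := by
  split <;> omega

-- Python's bit tests, reduced to Nat.testBit on a nonnegative value
theorem pv_one_shl (k : Nat) : (1 : Int) <<< k = ((2 ^ k : Nat) : Int) := by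
  simp [Int.shiftLeft_eq]

-- the top-level lambdas elaborate their shifts with an Int shift amount; bridge to the Nat form
theorem pv_shl_int (k : Nat) :
    @HShiftLeft.hShiftLeft Int Int Int _ (1 : Int) ((k : Nat) : Int) = (1 : Int) <<< k :=
  Int.shiftLeft_natCast_right 1 k

theorem pv_shr_int (m k : Nat) :
    @HShiftRight.hShiftRight Int Int Int _ ((m : Nat) : Int) ((k : Nat) : Int) = (m : Int) >>> k :=
  Int.shiftRight_natCast_right (m : Int) k

theorem pv_two_pow_ne (k : Nat) : ((2 ^ k : Nat) : Int) ≠ 0 := by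
  exact_mod_cast Nat.pos_iff_ne_zero.mp (Nat.two_pow_pos k)

theorem pv_bitA (m k : Nat) :
    PySem.Int.band ((1 : Int) <<< k) (m : Int) = if m.testBit k then ((2 ^ k : Nat) : Int) else 0 := by
  rw [pv_one_shl, PySem.Int.band_natCast, Nat.two_pow_and]
  cases h : m.testBit k <;> simp [h]

theorem pv_bitB (m k : Nat) :
    PySem.Int.band ((m : Int) >>> k) 1 = if m.testBit k then 1 else 0 := by
  rw [← Int.natCast_shiftRight, show (1 : Int) = ((1 : Nat) : Int) from rfl,
    PySem.Int.band_natCast, Nat.and_one_is_mod, Nat.shiftRight_eq_div_pow,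
    Nat.testBit_eq_decide_div_mod_eq]
  rcases Nat.mod_two_eq_zero_or_one (m / 2 ^ k) with h | h <;> simp [h]

theorem pv_bit_high {m : Nat} (hm : m < 2 ^ 32) {k : Nat} (hk : 32 ≤ k) :
    m.testBit k = false :=
  Nat.testBit_eq_false_of_lt (lt_of_lt_of_le hm (Nat.pow_le_pow_right (by norm_num) hk))

theorem pv_bit_lt {m : Nat} (hm : m < 2 ^ 32) {k : Nat} (hb : m.testBit k = true) : k < 32 := by
  by_contra h
  rw [pv_bit_high hm (by omega)] at hb
  simp at hb

-- run of ones starting at k (the Nat-level meaning of pvAbove) and run of ones ending below k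
def runN (m k : Nat) : Nat :=
  if 33 ≤ k then 0
  else if m.testBit k then runN m (k + 1) + 1 else 0
termination_by 33 - k
decreasing_by omega

theorem runN_eq (m k : Nat) :
    runN m k = if 33 ≤ k then 0 else if m.testBit k then runN m (k + 1) + 1 else 0 := by
  rw [runN]

def zlN (m : Nat) : Nat → Nat
  | 0 => 0
  | k+1 => if m.testBit k then zlN m k + 1 else 0

theorem pvAbove_eq (m : Nat) : ∀ fuel k, 33 - k ≤ fuel → pvAbove (m : Int) fuel k = (runN m k : Int) := by
  intro fuel
  induction fuel with
  | zero =>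
    intro k hk
    rw [pvAbove, runN_eq, if_pos (show 33 ≤ k by omega)]
    simp
  | succ fuel ih =>
    intro k hk
    rw [pvAbove, runN_eq, pv_bitB]
    by_cases h33 : 33 ≤ k
    · rw [if_pos h33, if_pos h33]; simp
    · rw [if_neg h33, if_neg h33]
      by_cases hb : m.testBit k = true
      · rw [if_pos hb, if_pos (show (1 : Int) ≠ 0 by norm_num), if_pos hb, ih (k+1) (by omega)]
        push_cast; ring
      · rw [if_neg hb, if_neg (show ¬ ((0 : Int) ≠ 0) by simp), if_neg hb]
        simp

theorem runN_le33 (m : Nat) : ∀ d k, 33 - k ≤ d → runN m k ≤ 33 - k := by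
  intro d
  induction d with
  | zero => intro k hk; rw [runN_eq, if_pos (show 33 ≤ k by omega)]; omega
  | succ d ih =>
    intro k hk
    rw [runN_eq]
    by_cases h33 : 33 ≤ k
    · rw [if_pos h33]; omega
    · rw [if_neg h33]
      by_cases hb : m.testBit k = true
      · rw [if_pos hb]
        have := ih (k+1) (by omega)
        omega
      · rw [if_neg hb]; omega

theorem runN_le33' (m k : Nat) : runN m k ≤ 33 - k := runN_le33 m (33 - k) k (by omega)

theorem runN_bits (m : Nat) : ∀ d k j, 33 - k ≤ d → j < runN m k → m.testBit (k + j) = true := by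
  intro d
  induction d with
  | zero => intro k j hk hj; rw [runN_eq, if_pos (show 33 ≤ k by omega)] at hj; omega
  | succ d ih =>
    intro k j hk hj
    rw [runN_eq] at hj
    by_cases h33 : 33 ≤ k
    · rw [if_pos h33] at hj; omega
    · rw [if_neg h33] at hj
      by_cases hb : m.testBit k = true
      · rw [if_pos hb] at hj
        cases j with
        | zero => simpa using hb
        | succ j =>
          have := ih (k+1) j (by omega) (by omega)
          rwa [show k + 1 + j = k + (j + 1) from by omega] at this
      · rw [if_neg hb] at hj; omega

theorem runN_bits' (m k j : Nat) (hj : j < runN m k) : m.testBit (k + j) = true :=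
  runN_bits m (33 - k) k j (by omega) hj

theorem runN_end {m : Nat} (hm : m < 2 ^ 32) : ∀ d k, 33 - k ≤ d → m.testBit (k + runN m k) = false := by
  intro d
  induction d with
  | zero =>
    intro k hk
    rw [runN_eq, if_pos (show 33 ≤ k by omega)]
    exact pv_bit_high hm (by omega)
  | succ d ih =>
    intro k hk
    rw [runN_eq]
    by_cases h33 : 33 ≤ k
    · rw [if_pos h33]; exact pv_bit_high hm (by omega)
    · rw [if_neg h33]
      by_cases hb : m.testBit k = true
      · rw [if_pos hb]
        have := ih (k+1) (by omega)
        rwa [show k + 1 + runN m (k+1) = k + (runN m (k+1) + 1) from by omega] at this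
      · rw [if_neg hb]
        have hbf : m.testBit k = false := by simpa using hb
        simpa using hbf

theorem runN_end' {m : Nat} (hm : m < 2 ^ 32) (k : Nat) : m.testBit (k + runN m k) = false :=
  runN_end hm (33 - k) k (by omega)

theorem runN_pos {m k : Nat} (hk : k < 33) (hb : m.testBit k = true) :
    runN m k = runN m (k+1) + 1 := by
  rw [runN_eq, if_neg (show ¬ 33 ≤ k by omega), if_pos hb]

theorem runN_zero {m k : Nat} (hb : m.testBit k = false) : runN m k = 0 := by
  rw [runN_eq]
  by_cases h33 : 33 ≤ k
  · rw [if_pos h33]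
  · rw [if_neg h33, if_neg (by simp [hb])]

theorem runN_ge (m : Nat) : ∀ c k, (∀ d, d < c → m.testBit (k + d) = true) → k + c ≤ 33 →
    c ≤ runN m k := by
  intro c
  induction c with
  | zero => intro k _ _; omega
  | succ c ih =>
    intro k hbits hk
    have hb : m.testBit k = true := by simpa using hbits 0 (by omega)
    rw [runN_pos (by omega) hb]
    have := ih (k+1) (fun d hd => by
      have := hbits (d+1) (by omega)
      rwa [show k + (d + 1) = k + 1 + d from by omega] at this) (by omega)
    omega

theorem runN_le_of_end (m k c : Nat) (h : m.testBit (k + c) = false) : runN m k ≤ c := by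
  by_contra hlt
  have := runN_bits' m k c (by omega)
  rw [this] at h
  simp at h

-- runs scan only the bits they report: agreement transfer
theorem runN_congr_ge (m y : Nat) : ∀ d k, 33 - k ≤ d →
    (∀ j, k ≤ j → y.testBit j = m.testBit j) → runN y k = runN m k := by
  intro d
  induction d with
  | zero =>
    intro k hk _
    rw [runN_eq y k, runN_eq m k, if_pos (show 33 ≤ k by omega), if_pos (show 33 ≤ k by omega)]
  | succ d ih =>
    intro k hk hagree
    rw [runN_eq y k, runN_eq m k]
    by_cases h33 : 33 ≤ k
    · rw [if_pos h33, if_pos h33]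
    · rw [if_neg h33, if_neg h33, hagree k le_rfl]
      by_cases hb : m.testBit k = true
      · rw [if_pos hb, if_pos hb, ih (k+1) (by omega) (fun j hj => hagree j (by omega))]
      · rw [if_neg hb, if_neg hb]

-- a stretch of c ones starting at k prolongs the run
theorem runN_add (y : Nat) : ∀ c k, (∀ d, d < c → y.testBit (k + d) = true) → k + c ≤ 33 →
    runN y k = c + runN y (k + c) := by
  intro c
  induction c with
  | zero => intro k _ _; simp
  | succ c ih =>
    intro k hbits hk
    have hb : y.testBit k = true := by simpa using hbits 0 (by omega)
    rw [runN_pos (by omega) hb]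
    rw [ih (k+1) (fun d hd => by
      have := hbits (d+1) (by omega)
      rwa [show k + (d + 1) = k + 1 + d from by omega] at this) (by omega)]
    rw [show k + 1 + c = k + (c + 1) from by omega]
    omega

-- zlN facts
theorem zlN_le (m : Nat) : ∀ k, zlN m k ≤ k := by
  intro k
  induction k with
  | zero => simp [zlN]
  | succ k ih =>
    simp only [zlN]
    by_cases hb : m.testBit k = true
    · rw [if_pos hb]; omega
    · rw [if_neg hb]; omega

theorem zlN_bits (m : Nat) : ∀ k d, d < zlN m k → m.testBit (k - 1 - d) = true := by
  intro k
  induction k with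
  | zero => intro d hd; simp [zlN] at hd
  | succ k ih =>
    intro d hd
    simp only [zlN] at hd
    by_cases hb : m.testBit k = true
    · rw [if_pos hb] at hd
      cases d with
      | zero => simpa using hb
      | succ d =>
        have := ih d (by omega)
        rwa [show k + 1 - 1 - (d + 1) = k - 1 - d from by omega]
    · rw [if_neg hb] at hd; omega

theorem zlN_end (m : Nat) : ∀ k, zlN m k < k → m.testBit (k - zlN m k - 1) = false := by
  intro k
  induction k with
  | zero => intro h; omega
  | succ k ih =>
    intro h
    simp only [zlN] at h ⊢
    by_cases hb : m.testBit k = true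
    · rw [if_pos hb] at h ⊢
      have hzle := zlN_le m k
      have := ih (by omega)
      rwa [show k + 1 - (zlN m k + 1) - 1 = k - zlN m k - 1 from by omega]
    · rw [if_neg hb] at h ⊢
      have hbf : m.testBit k = false := by simpa using hb
      simpa using hbf

theorem zlN_ge (m : Nat) : ∀ k c, c ≤ k → (∀ d, d < c → m.testBit (k - 1 - d) = true) →
    c ≤ zlN m k := by
  intro k
  induction k with
  | zero => intro c hc _; omega
  | succ k ih =>
    intro c hc hbits
    cases c with
    | zero => omega
    | succ c =>
      have hb : m.testBit k = true := by simpa using hbits 0 (by omega)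
      simp only [zlN]
      rw [if_pos hb]
      have := ih c (by omega) (fun d hd => by
        have := hbits (d+1) (by omega)
        rwa [show k + 1 - 1 - (d + 1) = k - 1 - d from by omega] at this)
      omega

-- the left run seen from the right end of a run
theorem zlN_run_end {m : Nat} (hm : m < 2 ^ 32) :
    ∀ d k, runN m k ≤ d → m.testBit k = true → zlN m (k + runN m k) = runN m k + zlN m k := by
  intro d
  induction d with
  | zero =>
    intro k h0 hb
    have hk := pv_bit_lt hm hb
    rw [runN_pos (by omega) hb] at h0
    omega
  | succ d ih =>
    intro k hd hb
    have hk := pv_bit_lt hm hb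
    have hrk : runN m k = runN m (k+1) + 1 := runN_pos (by omega) hb
    by_cases hb1 : m.testBit (k+1) = true
    · have := ih (k+1) (by omega) hb1
      rw [show k + 1 + runN m (k+1) = k + runN m k from by omega] at this
      rw [this]
      simp only [zlN]
      rw [if_pos hb]
      omega
    · have hbf1 : m.testBit (k+1) = false := by simpa using hb1
      have hr1 : runN m (k+1) = 0 := runN_zero hbf1
      rw [hrk, hr1]
      show zlN m (k + 1) = _
      simp only [zlN]
      rw [if_pos hb]
      omega

-- LM: what A's find_longest_length computes — max run length over set bits in [i, 32)
def LM (y i : Nat) : Int :=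
  if h : i < 32 then
    if y.testBit i then max (runN y i : Int) (LM y (i + 1)) else LM y (i + 1)
  else 0
termination_by 32 - i
decreasing_by all_goals omega

theorem LM_eq (y i : Nat) :
    LM y i = if i < 32 then
      (if y.testBit i then max (runN y i : Int) (LM y (i + 1)) else LM y (i + 1)) else 0 := by
  rw [LM]
  by_cases h : i < 32
  · rw [dif_pos h, if_pos h]
  · rw [dif_neg h, if_neg h]

theorem LM_nonneg (y : Nat) : ∀ d i, 32 - i ≤ d → 0 ≤ LM y i := by
  intro d
  induction d with
  | zero => intro i hi; rw [LM_eq, if_neg (show ¬ i < 32 by omega)]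
  | succ d ih =>
    intro i hi
    rw [LM_eq]
    by_cases h32 : i < 32
    · rw [if_pos h32]
      have := ih (i+1) (by omega)
      by_cases hb : y.testBit i = true
      · rw [if_pos hb]; omega
      · rw [if_neg hb]; exact this
    · rw [if_neg h32]

theorem LM_nonneg' (y i : Nat) : 0 ≤ LM y i := LM_nonneg y (32 - i) i (by omega)

theorem LM_ge (y : Nat) : ∀ d i s, 32 - i ≤ d → i ≤ s → s < 32 → y.testBit s = true →
    (runN y s : Int) ≤ LM y i := by
  intro d
  induction d with
  | zero => intro i s hd his hs _; omega
  | succ d ih =>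
    intro i s hd his hs hb
    rw [LM_eq, if_pos (show i < 32 by omega)]
    rcases Nat.eq_or_lt_of_le his with rfl | hlt
    · rw [if_pos hb]; exact le_max_left _ _
    · have := ih (i+1) s (by omega) (by omega) hs hb
      by_cases hbi : y.testBit i = true
      · rw [if_pos hbi]; exact le_trans this (le_max_right _ _)
      · rw [if_neg hbi]; exact this

theorem LM_le (y : Nat) (C : Int) (hC : 0 ≤ C)
    (h : ∀ s, s < 32 → y.testBit s = true → (runN y s : Int) ≤ C) :
    ∀ d i, 32 - i ≤ d → LM y i ≤ C := by
  intro d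
  induction d with
  | zero => intro i hi; rw [LM_eq, if_neg (show ¬ i < 32 by omega)]; exact hC
  | succ d ih =>
    intro i hi
    rw [LM_eq]
    by_cases h32 : i < 32
    · rw [if_pos h32]
      have hrec := ih (i+1) (by omega)
      by_cases hb : y.testBit i = true
      · rw [if_pos hb]; exact max_le (h i h32 hb) hrec
      · rw [if_neg hb]; exact hrec
    · rw [if_neg h32]; exact hC

-- the run decomposition A's outer loop performs
theorem LM_run {y : Nat} (hy : y < 2 ^ 32) :
    ∀ d i, 32 - i ≤ d → i < 32 → y.testBit i = true →
    LM y i = max (runN y i : Int) (LM y (i + runN y i + 1)) := by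
  intro d
  induction d with
  | zero => intro i hd hi _; omega
  | succ d ih =>
    intro i hd hi hb
    have hrk : runN y i = runN y (i+1) + 1 := runN_pos (by omega) hb
    rw [LM_eq y i, if_pos hi, if_pos hb]
    by_cases hb1 : y.testBit (i+1) = true
    · have hi1 : i + 1 < 32 := pv_bit_lt hy hb1
      rw [ih (i+1) (by omega) hi1 hb1]
      rw [show i + 1 + runN y (i+1) + 1 = i + runN y i + 1 from by omega]
      rw [hrk]
      push_cast
      omega
    · have hbf1 : y.testBit (i+1) = false := by simpa using hb1
      have hr1 : runN y (i+1) = 0 := runN_zero hbf1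
      rw [show i + runN y i + 1 = i + 2 from by omega]
      have h2 : LM y (i+1) = LM y (i+2) := by
        by_cases h32 : i + 1 < 32
        · rw [LM_eq y (i+1), if_pos h32, if_neg (by simp [hbf1])]
        · rw [LM_eq y (i+1), if_neg h32, LM_eq y (i+2), if_neg (by omega)]
      rw [h2]

-- pvInner computes the run at j
theorem pvInner_eq {y : Nat} (hy : y < 2 ^ 32) :
    ∀ fuel (c : Int) (j : Nat), runN y j ≤ fuel →
    pvInner (y : Int) fuel c (j : Int) = (c + (runN y j : Int), (j : Int) + (runN y j : Int)) := by
  intro fuel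
  induction fuel with
  | zero =>
    intro c j h0
    rw [pvInner]
    have hr : runN y j = 0 := by omega
    rw [hr]
    push_cast
    simp
  | succ fuel ih =>
    intro c j hf
    rw [pvInner, Int.toNat_natCast, pv_bitA]
    by_cases hb : y.testBit j = true
    · have hj : j < 32 := pv_bit_lt hy hb
      have hrk : runN y j = runN y (j+1) + 1 := runN_pos (by omega) hb
      rw [if_pos hb, if_pos (pv_two_pow_ne j)]
      rw [show (j : Int) + 1 = ((j + 1 : Nat) : Int) from by push_cast; ring]
      rw [ih (c+1) (j+1) (by omega), hrk]
      simp only [Prod.mk.injEq]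
      constructor <;> (push_cast; ring)
    · have hbf : y.testBit j = false := by simpa using hb
      rw [if_neg hb, if_neg (show ¬ ((0 : Int) ≠ 0) by simp), runN_zero hbf]
      push_cast
      simp

-- pvFLL computes LM
theorem pvFLL_eq {y : Nat} (hy : y < 2 ^ 32) :
    ∀ fuel (i : Nat) (longest : Int), 0 ≤ longest → 33 - i ≤ fuel →
    pvFLL (y : Int) fuel (i : Int) longest = max longest (LM y i) := by
  intro fuel
  induction fuel with
  | zero =>
    intro i longest h0 hf
    rw [pvFLL, LM_eq, if_neg (show ¬ i < 32 by omega)]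
    omega
  | succ fuel ih =>
    intro i longest h0 hf
    rw [pvFLL]
    by_cases h32 : i < 32
    · rw [if_pos (show ((i : Int)) < 32 from by exact_mod_cast h32), Int.toNat_natCast, pv_bitA]
      by_cases hb : y.testBit i = true
      · rw [if_pos hb, if_pos (pv_two_pow_ne i)]
        have hrun : runN y i ≤ 40 := by have := runN_le33' y i; omega
        simp only [pvInner_eq hy 40 0 i hrun, zero_add]
        rw [pv_if_max]
        rw [show (i : Int) + (runN y i : Int) + 1 = ((i + runN y i + 1 : Nat) : Int) from by
          push_cast; ring]
        rw [ih (i + runN y i + 1) _ (le_trans h0 (le_max_left _ _)) (by omega)]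
        rw [LM_run hy (32 - i) i (by omega) h32 hb]
        omega
      · rw [if_neg hb, if_neg (show ¬ ((0 : Int) ≠ 0) by simp)]
        rw [show (i : Int) + 1 = ((i + 1 : Nat) : Int) from by push_cast; ring]
        rw [ih (i+1) longest h0 (by omega)]
        rw [LM_eq y i, if_pos h32, if_neg hb]
    · rw [if_neg (show ¬ ((i : Int)) < 32 from by exact_mod_cast h32)]
      rw [LM_eq, if_neg h32]
      omega

-- M: what B computes; AM: what A's top-level loop computes
def MN (m : Nat) : Nat → Int
  | 0 => 0
  | n+1 => if m.testBit n then MN m n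
           else max (MN m n) ((zlN m n : Int) + 1 + (runN m (n+1) : Int))

def AMN (m : Nat) : Nat → Int
  | 0 => 0
  | n+1 => if m.testBit n then AMN m n else max (AMN m n) (LM (m ||| 2 ^ n) 0)

theorem MN_nonneg (m : Nat) : ∀ n, 0 ≤ MN m n := by
  intro n
  induction n with
  | zero => simp [MN]
  | succ n ih =>
    rw [MN]
    by_cases hb : m.testBit n = true
    · rw [if_pos hb]; exact ih
    · rw [if_neg hb]; omega

theorem AMN_nonneg (m : Nat) : ∀ n, 0 ≤ AMN m n := by
  intro n
  induction n with
  | zero => simp [AMN]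
  | succ n ih =>
    rw [AMN]
    by_cases hb : m.testBit n = true
    · rw [if_pos hb]; exact ih
    · rw [if_neg hb]
      have := LM_nonneg' (m ||| 2 ^ n) 0
      omega

theorem MN_ge (m : Nat) : ∀ n k, k < n → m.testBit k = false →
    (zlN m k : Int) + 1 + (runN m (k+1) : Int) ≤ MN m n := by
  intro n
  induction n with
  | zero => intro k h _; omega
  | succ n ih =>
    intro k hk hb
    rw [MN]
    rcases Nat.lt_or_ge k n with h | h
    · have := ih k h hb
      by_cases hbn : m.testBit n = true
      · rw [if_pos hbn]; exact this
      · rw [if_neg hbn]; exact le_trans this (le_max_left _ _)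
    · have hkn : k = n := by omega
      subst hkn
      rw [if_neg (by simp [hb])]
      exact le_max_right _ _

theorem AMN_ge (m : Nat) : ∀ n k, k < n → m.testBit k = false →
    LM (m ||| 2 ^ k) 0 ≤ AMN m n := by
  intro n
  induction n with
  | zero => intro k h _; omega
  | succ n ih =>
    intro k hk hb
    rw [AMN]
    rcases Nat.lt_or_ge k n with h | h
    · have := ih k h hb
      by_cases hbn : m.testBit n = true
      · rw [if_pos hbn]; exact this
      · rw [if_neg hbn]; exact le_trans this (le_max_left _ _)
    · have hkn : k = n := by omega
      subst hkn
      rw [if_neg (by simp [hb])]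
      exact le_max_right _ _

-- bits of m ||| 2^k
theorem pv_bity (m k j : Nat) : (m ||| 2 ^ k).testBit j = (m.testBit j || decide (k = j)) := by
  rw [Nat.testBit_lor, Nat.testBit_two_pow]

-- key bound: every full run of m (left part + right part seen from a set bit) is < MN m 32
theorem run_lt_MN {m : Nat} (hm : m < 2 ^ 32) (hm31 : m ≤ 2 ^ 31) :
    ∀ s, s < 32 → m.testBit s = true → (zlN m s : Int) + (runN m s : Int) < MN m 32 := by
  intro s hs hb
  by_cases he : s + runN m s < 32
  · -- the zero bit just above the run
    have hbe : m.testBit (s + runN m s) = false := runN_end' hm s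
    have hge := MN_ge m 32 (s + runN m s) he hbe
    have hzl : zlN m (s + runN m s) = runN m s + zlN m s :=
      zlN_run_end hm (runN m s) s le_rfl hb
    rw [hzl] at hge
    push_cast at hge ⊢
    omega
  · -- the run reaches bit 31; find the zero bit just below the left part
    have hr33 := runN_le33' m s
    have ht : zlN m s < s := by
      rcases Nat.lt_or_ge (zlN m s) s with h | h
      · exact h
      · exfalso
        have hts : zlN m s = s := le_antisymm (zlN_le m s) h
        have hb31 : m.testBit 31 = true := by
          have h31 : 31 - s < runN m s := by omega
          have := runN_bits' m s (31 - s) h31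
          rwa [show s + (31 - s) = 31 from by omega] at this
        have hm31' : 2 ^ 31 ≤ m := Nat.ge_two_pow_of_testBit hb31
        have hmeq : m = 2 ^ 31 := le_antisymm hm31 hm31'
        rcases Nat.eq_zero_or_pos s with rfl | hpos
        · rw [hmeq, Nat.testBit_two_pow_of_ne (by omega)] at hb
          simp at hb
        · have hbit : m.testBit (s - 1 - 0) = true := zlN_bits m s 0 (by omega)
          rw [hmeq, Nat.testBit_two_pow_of_ne (by omega)] at hbit
          simp at hbit
    have hk' : m.testBit (s - zlN m s - 1) = false := zlN_end m s ht
    have hklt : s - zlN m s - 1 < 32 := by omega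
    have hge := MN_ge m 32 (s - zlN m s - 1) hklt hk'
    have hrge : zlN m s + runN m s ≤ runN m (s - zlN m s - 1 + 1) := by
      apply runN_ge
      · intro d hd
        rcases Nat.lt_or_ge d (zlN m s) with hdz | hdz
        · have := zlN_bits m s (zlN m s - 1 - d) (by omega)
          rwa [show s - 1 - (zlN m s - 1 - d) = s - zlN m s - 1 + 1 + d from by omega] at this
        · have := runN_bits' m s (d - zlN m s) (by omega)
          rwa [show s + (d - zlN m s) = s - zlN m s - 1 + 1 + d from by omega] at this
      · omega
    push_cast at hge ⊢
    omega

-- upper bound: every run of the flipped word is ≤ MN m 32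
theorem flipped_run_le {m : Nat} (hm : m < 2 ^ 32) (hm31 : m ≤ 2 ^ 31)
    {k : Nat} (hk : k < 32) (hbk : m.testBit k = false) :
    ∀ s, s < 32 → (m ||| 2 ^ k).testBit s = true → (runN (m ||| 2 ^ k) s : Int) ≤ MN m 32 := by
  intro s hs hbs
  set y := m ||| 2 ^ k with hy
  have hagree : ∀ j, j ≠ k → y.testBit j = m.testBit j := by
    intro j hj
    rw [pv_bity]
    simp [Ne.symm hj]
  have hyk : y.testBit k = true := by rw [pv_bity]; simp
  have hrk : runN y k = runN m (k+1) + 1 := by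
    rw [runN_pos (by omega) hyk]
    congr 1
    exact runN_congr_ge m y (33 - (k+1)) (k+1) (by omega) (fun j hj => hagree j (by omega))
  rcases Nat.lt_trichotomy s k with hsk | rfl | hsk
  · -- s below k
    have hbs' : m.testBit s = true := by rw [← hagree s (by omega)]; exact hbs
    have hr33 := runN_le33' m s
    rcases Nat.lt_trichotomy (s + runN m s) k with hrun | hrun | hrun
    · -- run of s ends below k: identical in y and m
      have hsame : runN y s = runN m s := by
        apply le_antisymm
        · apply runN_le_of_end
          rw [hagree (s + runN m s) (by omega)]
          exact runN_end' hm s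
        · apply runN_ge
          · intro d hd
            rw [hagree (s + d) (by omega)]
            exact runN_bits' m s d hd
          · omega
      rw [hsame]
      have := run_lt_MN hm hm31 s (by omega) hbs'
      push_cast at this ⊢
      omega
    · -- run of s reaches exactly k: merged run
      have hadd : runN y s = (k - s) + runN y k := by
        have := runN_add y (k - s) s (fun d hd => by
          rw [hagree (s + d) (by omega)]
          exact runN_bits' m s d (by omega)) (by omega)
        rwa [show s + (k - s) = k from by omega] at this
      have hzl : (k - s) ≤ zlN m k := by
        apply zlN_ge
        · omega
        · intro d hd
          have := runN_bits' m s (k - s - 1 - d) (by omega)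
          rwa [show s + (k - s - 1 - d) = k - 1 - d from by omega] at this
      have hge := MN_ge m 32 k hk hbk
      rw [hadd, hrk]
      push_cast at hge ⊢
      omega
    · -- impossible: bit k of m would be set
      exfalso
      have := runN_bits' m s (k - s) (by omega)
      rw [show s + (k - s) = k from by omega] at this
      rw [this] at hbk
      simp at hbk
  · -- s = k itself
    have hge := MN_ge m 32 s hk hbk
    rw [hrk]
    push_cast at hge ⊢
    omega
  · -- s above k: run identical in y and m
    have hbs' : m.testBit s = true := by rw [← hagree s (by omega)]; exact hbs
    have hsame : runN y s = runN m s :=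
      runN_congr_ge m y (33 - s) s (by omega) (fun j hj => hagree j (by omega))
    rw [hsame]
    have := run_lt_MN hm hm31 s hs hbs'
    push_cast at this ⊢
    omega

-- lower bound: the merged run is realized in the flipped word
theorem merged_le_LM {m : Nat} (hm : m < 2 ^ 32)
    {k : Nat} (hk : k < 32) (hbk : m.testBit k = false) :
    (zlN m k : Int) + 1 + (runN m (k+1) : Int) ≤ LM (m ||| 2 ^ k) 0 := by
  set y := m ||| 2 ^ k with hy
  have hagree : ∀ j, j ≠ k → y.testBit j = m.testBit j := by
    intro j hj
    rw [pv_bity]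
    simp [Ne.symm hj]
  have hyk : y.testBit k = true := by rw [pv_bity]; simp
  have hrk : runN y k = runN m (k+1) + 1 := by
    rw [runN_pos (by omega) hyk]
    congr 1
    exact runN_congr_ge m y (33 - (k+1)) (k+1) (by omega) (fun j hj => hagree j (by omega))
  have hzle := zlN_le m k
  have hs0 : y.testBit (k - zlN m k) = true := by
    rcases Nat.eq_zero_or_pos (zlN m k) with hz | hz
    · rw [hz]; simpa using hyk
    · rw [hagree (k - zlN m k) (by omega)]
      have := zlN_bits m k (zlN m k - 1) (by omega)
      rwa [show k - 1 - (zlN m k - 1) = k - zlN m k from by omega] at this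
  have hadd : runN y (k - zlN m k) = zlN m k + runN y k := by
    have := runN_add y (zlN m k) (k - zlN m k) (fun d hd => by
      rcases Nat.lt_or_ge (k - zlN m k + d) k with hlt | hge
      · rw [hagree (k - zlN m k + d) (by omega)]
        have := zlN_bits m k (zlN m k - 1 - d) (by omega)
        rwa [show k - 1 - (zlN m k - 1 - d) = k - zlN m k + d from by omega] at this
      · rwa [show k - zlN m k + d = k from by omega]) (by omega)
    rwa [show k - zlN m k + zlN m k = k from by omega] at this
  have hlm := LM_ge y (32 - 0) 0 (k - zlN m k) (by omega) (by omega) (by omega) hs0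
  rw [hadd, hrk] at hlm
  push_cast at hlm ⊢
  omega

-- AMN = MN at 32
theorem MN_le_AMN {m : Nat} (hm : m < 2 ^ 32) : ∀ n, n ≤ 32 → MN m n ≤ AMN m 32 := by
  intro n
  induction n with
  | zero => intro _; rw [MN]; exact AMN_nonneg m 32
  | succ n ih =>
    intro hn
    rw [MN]
    by_cases hb : m.testBit n = true
    · rw [if_pos hb]; exact ih (by omega)
    · rw [if_neg hb]
      have hbf : m.testBit n = false := by simpa using hb
      apply max_le (ih (by omega))
      calc (zlN m n : Int) + 1 + (runN m (n+1) : Int)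
          ≤ LM (m ||| 2 ^ n) 0 := merged_le_LM hm (by omega) hbf
        _ ≤ AMN m 32 := AMN_ge m 32 n (by omega) hbf

theorem AMN_le_MN {m : Nat} (hm : m < 2 ^ 32) (hm31 : m ≤ 2 ^ 31) :
    ∀ n, n ≤ 32 → AMN m n ≤ MN m 32 := by
  intro n
  induction n with
  | zero => intro _; rw [AMN]; exact MN_nonneg m 32
  | succ n ih =>
    intro hn
    rw [AMN]
    by_cases hb : m.testBit n = true
    · rw [if_pos hb]; exact ih (by omega)
    · rw [if_neg hb]
      have hbf : m.testBit n = false := by simpa using hb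
      apply max_le (ih (by omega))
      exact LM_le (m ||| 2 ^ n) (MN m 32) (MN_nonneg m 32)
        (fun s hs hbs => flipped_run_le hm hm31 (by omega) hbf s hs hbs) (32 - 0) 0 (by omega)

theorem AMN_eq_MN {m : Nat} (hm : m < 2 ^ 32) (hm31 : m ≤ 2 ^ 31) : AMN m 32 = MN m 32 :=
  le_antisymm (AMN_le_MN hm hm31 32 le_rfl) (MN_le_AMN hm 32 le_rfl)

-- the concrete iteration list of both top-level loops
theorem pv_pyRange32 : PySem.List.pyRange 0 32 1 = (List.range 32).map (Nat.cast : Nat → Int) := by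
  decide

-- A's top-level foldl computes AMN
theorem foldA_eq {m : Nat} (hm : m < 2 ^ 32) (hm31 : m ≤ 2 ^ 31) :
    ∀ n, n ≤ 32 →
    ((List.range n).map (Nat.cast : Nat → Int)).foldl (fun ac i =>
      if PySem.Int.band ((1 : Int) <<< i.toNat) (m : Int) = 0 then
        let l := pvFLL (PySem.Int.bor ((1 : Int) <<< i.toNat) (m : Int)) 40 0 0
        if ac < l then l else ac
      else ac) 0 = AMN m n := by
  intro n
  induction n with
  | zero => intro _; simp [AMN]
  | succ n ih =>
    intro hn
    rw [List.range_succ, List.map_append, List.foldl_append, ih (by omega)]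
    simp only [List.map_cons, List.map_nil, List.foldl_cons, List.foldl_nil]
    rw [Int.toNat_natCast, pv_shl_int n, pv_bitA, AMN]
    by_cases hb : m.testBit n = true
    · rw [if_pos hb, if_pos hb, if_neg (by simpa using pv_two_pow_ne n)]
    · rw [if_neg hb, if_neg hb, if_pos rfl]
      have hbor : PySem.Int.bor ((1 : Int) <<< n) (m : Int) = ((m ||| 2 ^ n : Nat) : Int) := by
        rw [pv_one_shl, PySem.Int.bor_natCast, Nat.or_comm]
      have hylt : m ||| 2 ^ n < 2 ^ 32 :=
        Nat.or_lt_two_pow hm (Nat.pow_lt_pow_right (by norm_num) (by omega))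
      have h0 := pvFLL_eq hylt 40 0 0 le_rfl (by omega)
      rw [Nat.cast_zero, max_eq_right (LM_nonneg' _ 0)] at h0
      simp only [hbor, h0, pv_if_max]

-- B's foldl invariant: state = (MN so far, current left run length)
theorem foldB_eq (m : Nat) : ∀ n,
    ((List.range n).map (Nat.cast : Nat → Int)).foldl (fun (bl : Int × Int) i =>
      if PySem.Int.band ((m : Int) >>> i.toNat) 1 ≠ 0 then (bl.1, bl.2 + 1)
      else (max bl.1 (bl.2 + 1 + pvAbove (m : Int) 40 (i.toNat + 1)), 0)) (0, 0)
    = (MN m n, (zlN m n : Int)) := by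
  intro n
  induction n with
  | zero => simp [MN, zlN]
  | succ n ih =>
    rw [List.range_succ, List.map_append, List.foldl_append, ih]
    simp only [List.map_cons, List.map_nil, List.foldl_cons, List.foldl_nil]
    rw [Int.toNat_natCast, pv_shr_int m n, pv_bitB, MN]
    by_cases hb : m.testBit n = true
    · rw [if_pos hb, if_pos (show (1 : Int) ≠ 0 by norm_num), if_pos hb]
      have hz : zlN m (n+1) = zlN m n + 1 := by simp only [zlN]; rw [if_pos hb]
      rw [hz, show ((zlN m n + 1 : Nat) : Int) = (zlN m n : Int) + 1 from by push_cast; ring]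
    · rw [if_neg hb, if_neg (show ¬ ((0 : Int) ≠ 0) by simp), if_neg hb]
      have hz : zlN m (n+1) = 0 := by simp only [zlN]; rw [if_neg hb]
      rw [hz, pvAbove_eq m 40 (n+1) (by omega), Nat.cast_zero]

-- assembling the two ports for positive x
theorem ports_eq_pos {x : Int} (hx : 0 < x) (hx31 : x ≤ 2147483648) (hx34 : x ≠ 34) :
    flip_bit_to_win0 x = flip_bit_to_win0_alt x := by
  obtain ⟨m, rfl⟩ : ∃ m : Nat, x = (m : Int) := ⟨x.toNat, by omega⟩
  have hmle : m ≤ 2147483648 := by exact_mod_cast hx31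
  have hm31 : m ≤ 2 ^ 31 := by norm_num; exact hmle
  have hm32 : m < 2 ^ 32 := by norm_num; omega
  rw [flip_bit_to_win0, flip_bit_to_win0_alt]
  rw [if_neg (by rw [show PySem.Int.bxor 2 (33 - 1) = (34 : Int) from by decide]; exact hx34)]
  rw [if_neg (by omega)]
  rw [pv_pyRange32, foldA_eq hm32 hm31 32 le_rfl, foldB_eq m 32]
  exact AMN_eq_MN hm32 hm31

-- ===== VERDICT (by name: the statement is the Claim_ definition above) =====
theorem flip_bit_to_win0_spec : Claim_unchanged_flip_bit_to_win0 := by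
  intro x hdom hpre hnd
  have hx31 : x ≤ 2147483648 := by
    unfold Dom_flip_bit_to_win0 pvDomInt at hdom
    simp only [decide_eq_true_eq] at hdom
    exact hdom.2
  show flip_bit_to_win0 x = flip_bit_to_win0_alt x
  rcases hpre with hx | hneg
  · rcases lt_or_eq_of_le hx with hpos | hzero
    · exact ports_eq_pos hpos hx31 (fun h => hnd h)
    · rw [← hzero]; decide
  · rw [hneg]; decide

theorem flip_bit_to_win0_changed : Claim_changed_flip_bit_to_win0 := by
  unfold Claim_changed_flip_bit_to_win0; decide

theorem flip_bit_to_win0_tight : Claim_exact_flip_bit_to_win0 := by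
  intro x _ _ hd
  rw [show x = 34 from hd]
  decide
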